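-- pv_equiv track=rewrite | github.com/Seal-Li/EGES-Graph-Embedding | srcs/utils.py | node_transfer
-- ===== SOURCE A (Python) =====
-- def node_transfer(node_raw_ids):
--     # raw_id -> new_id and new_id -> raw_id
--     node_encoder, node_decoder = {}, []
--     node_id = -1
--     for node_raw_id in node_raw_ids:
--         node_id = encode_id(node_encoder,
--                         node_decoder,
--                         node_raw_id,
--                         node_id)
--     return node_encoder, node_decoder
--
-- def encode_id(encoder, decoder, raw_id, encoded_id):
--     if raw_id in encoder:
--         return encoded_id
--     encoded_id += 1
--     encoder[raw_id] = encoded_id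
--     decoder.append(raw_id)
--     return encoded_id
-- ===== SOURCE B (Python) =====
-- def node_transfer(node_raw_ids):
--     # B (alternative decomposition): peel off the head of the remaining ids, record it,
--     # and delete ALL of its other occurrences from the rest (nub-by-removal); then
--     # build the encoder in a second pass by enumerating the decoder. No seen-set,
--     # no membership test against containers already built.
--     node_decoder = []
--     pending = list(node_raw_ids)
--     while pending:
--         head = pending[0]
--         node_decoder.append(head)
--         pending = [x for x in pending[1:] if x != head]
--     node_encoder = {raw: i for i, raw in enumerate(node_decoder)}
--     return node_encoder, node_decoder
-- ===== Notes on version B (the rewrite author's own statement) =====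
-- stated objective: alternative
-- what changed: B replaces A's single seen-dict pass (membership test + threaded counter via encode_id) by a nub-by-removal loop that takes the head of the remaining ids and filters out all its later duplicates (no seen-set at all), then builds the encoder in a separate enumeration pass over the decoder; it trades A's O(n) hashing pass for an O(n*k) removal loop (k = number of distinct ids).
import Mathlib
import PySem

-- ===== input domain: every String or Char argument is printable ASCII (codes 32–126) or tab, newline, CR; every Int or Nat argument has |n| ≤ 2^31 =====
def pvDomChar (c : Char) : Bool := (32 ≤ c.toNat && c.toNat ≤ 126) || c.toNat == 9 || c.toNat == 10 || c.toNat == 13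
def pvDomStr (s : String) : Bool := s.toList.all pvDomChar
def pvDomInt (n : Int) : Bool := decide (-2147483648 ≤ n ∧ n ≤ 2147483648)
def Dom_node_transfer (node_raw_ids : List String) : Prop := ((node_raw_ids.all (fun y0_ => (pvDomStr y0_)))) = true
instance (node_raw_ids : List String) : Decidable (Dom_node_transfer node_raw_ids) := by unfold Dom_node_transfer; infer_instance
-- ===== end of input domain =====

-- B replaces A's seen-dict pass by a nub-by-removal loop (record the head, delete its later
-- duplicates from the rest) plus a separate enumeration pass for the encoder (objective: alternative).

-- ===== PORT A =====
def encode_id (encoder : PySem.Dict String Int) (decoder : List String) (raw_id : String)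
    (encoded_id : Int) : PySem.Dict String Int × List String × Int :=
  if encoder.contains raw_id then (encoder, decoder, encoded_id)
  else
    let encoded_id := encoded_id + 1
    (encoder.insert raw_id encoded_id, decoder ++ [raw_id], encoded_id)

def node_transfer (node_raw_ids : List String) : (List (String × Int)) × List String :=
  let st := node_raw_ids.foldl
    (fun (st : PySem.Dict String Int × List String × Int) raw =>
      encode_id st.1 st.2.1 raw st.2.2)
    (PySem.Dict.empty, [], -1)
  (st.1.items, st.2.1)

-- ===== PORT B =====
-- the while loop of Source B: take the head, keep it, drop all its other occurrences from the rest
def nubRemove : List String → List String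
  | [] => []
  | h :: t => h :: nubRemove (t.filter (fun x => x != h))
termination_by xs => xs.length
decreasing_by
  simpa using Nat.lt_succ_of_le (List.length_filter_le _ _)

def node_transfer_alt (node_raw_ids : List String) : (List (String × Int)) × List String :=
  let node_decoder := nubRemove node_raw_ids
  let node_encoder := (PySem.List.enumerate node_decoder 0).map (fun p => (p.2, p.1))
  (node_encoder, node_decoder)

-- ===== PRECONDITION & SPEC =====
def Spec_node_transfer (node_raw_ids : List String) (out : (List (String × Int)) × List String) : Prop := out = node_transfer_alt node_raw_ids
instance (node_raw_ids : List String) (out : (List (String × Int)) × List String) : Decidable (Spec_node_transfer node_raw_ids out) := by unfold Spec_node_transfer; infer_instance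

-- ===== CLAIM (what is proved, stated in full; the proofs are below) =====
def Claim_equal_node_transfer : Prop := ∀ (node_raw_ids : List String), Dom_node_transfer node_raw_ids → Spec_node_transfer node_raw_ids (node_transfer node_raw_ids)

-- ===== LEMMAS AND PROOFS =====

-- the dict A has built after processing a prefix whose deduped ids are `dec`
def mkd (dec : List String) : PySem.Dict String Int :=
  PySem.Dict.mk ((PySem.List.enumerate dec 0).map (fun p => (p.2, p.1)))

theorem any_enumerate (dec : List String) (x : String) :
    ∀ s : Int, ((PySem.List.enumerate dec s).any (fun p => p.2 == x)) = dec.any (fun y => y == x) := by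
  induction dec with
  | nil => intro s; simp [PySem.List.enumerate]
  | cons h t ih => intro s; simp [PySem.List.enumerate_cons, ih]

theorem contains_mkd (dec : List String) (x : String) :
    (mkd dec).contains x = dec.contains x := by
  simp only [mkd, PySem.Dict.contains_mk, List.any_map]
  rw [show ((fun p : String × Int => p.1 == x) ∘ (fun p : Int × String => (p.2, p.1)))
        = (fun p : Int × String => p.2 == x) from rfl]
  rw [any_enumerate, Bool.eq_iff_iff]
  simp only [List.any_eq_true, beq_iff_eq, List.contains_iff_mem]
  exact ⟨fun ⟨y, hy, e⟩ => e ▸ hy, fun hx' => ⟨x, hx', rfl⟩⟩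

theorem mkd_append (dec : List String) (x : String) (h : dec.contains x = false) :
    (mkd dec).insert x (dec.length : Int) = mkd (dec ++ [x]) := by
  have hc : (mkd dec).contains x = false := by rw [contains_mkd, h]
  simp only [PySem.Dict.insert, hc, Bool.false_eq_true, if_false]
  simp [mkd, PySem.List.enumerate_append, PySem.List.enumerate_cons, PySem.List.enumerate_nil]

theorem loop_lemma (xs : List String) : ∀ dec : List String,
    xs.foldl (fun (st : PySem.Dict String Int × List String × Int) raw =>
        encode_id st.1 st.2.1 raw st.2.2)
      (mkd dec, dec, (dec.length : Int) - 1)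
    = (mkd (PySem.Set.update dec xs), PySem.Set.update dec xs,
        ((PySem.Set.update dec xs).length : Int) - 1) := by
  induction xs with
  | nil => intro dec; simp [PySem.Set.update]
  | cons x xs ih =>
    intro dec
    by_cases h : dec.contains x = true
    · have hm : x ∈ dec := by simpa using h
      have hadd : PySem.Set.add dec x = dec := by
        simp [PySem.Set.add, PySem.Set.contains, hm]
      have hupd : PySem.Set.update dec (x :: xs) = PySem.Set.update dec xs := by
        simp [PySem.Set.update, hadd]
      rw [hupd, List.foldl_cons]
      have hstep : encode_id (mkd dec) dec x ((dec.length : Int) - 1)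
          = (mkd dec, dec, (dec.length : Int) - 1) := by
        simp only [encode_id, contains_mkd, h, if_true]
      rw [hstep]; exact ih dec
    · have h' : dec.contains x = false := by simpa using h
      have hm : x ∉ dec := by simpa using h'
      have hadd : PySem.Set.add dec x = dec ++ [x] := by
        simp [PySem.Set.add, PySem.Set.contains, hm]
      have hupd : PySem.Set.update dec (x :: xs) = PySem.Set.update (dec ++ [x]) xs := by
        simp [PySem.Set.update, hadd]
      rw [hupd, List.foldl_cons]
      have hstep : encode_id (mkd dec) dec x ((dec.length : Int) - 1)
          = (mkd (dec ++ [x]), dec ++ [x], ((dec ++ [x]).length : Int) - 1) := by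
        simp only [encode_id, contains_mkd, h', Bool.false_eq_true, if_false]
        have e1 : ((dec.length : Int) - 1) + 1 = (dec.length : Int) := by ring
        rw [e1, mkd_append dec x h']
        have e2 : (((dec ++ [x]).length : Int)) - 1 = (dec.length : Int) := by
          simp [List.length_append]
        rw [e2]
      rw [hstep]; exact ih (dec ++ [x])

-- every element of t that equals h is absorbed once h is in the accumulator
theorem foldl_add_filter (t : List String) : ∀ s : PySem.Set String, ∀ h : String,
    PySem.Set.contains s h = true →
    t.foldl PySem.Set.add s = (t.filter (fun x => x != h)).foldl PySem.Set.add s := by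
  induction t with
  | nil => intro s h _; rfl
  | cons x t ih =>
    intro s h hs
    have hs' : h ∈ s := by simpa [PySem.Set.contains] using hs
    by_cases hx : x = h
    · subst hx
      have habs : PySem.Set.add s x = s := by
        simp [PySem.Set.add, PySem.Set.contains, hs']
      simp only [List.filter_cons]
      rw [show ((x != x) = false) from by simp]
      simp only [Bool.false_eq_true, if_false, List.foldl_cons, habs]
      exact ih s x hs
    · have hmem : PySem.Set.contains (PySem.Set.add s x) h = true := by
        simp only [PySem.Set.add]
        split
        · exact hs
        · have : h ∈ s ++ [x] := List.mem_append_left _ hs'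
          simpa [PySem.Set.contains] using this
      simp only [List.filter_cons]
      rw [show ((x != h) = true) from by simp [hx]]
      simp only [if_true, List.foldl_cons]
      exact ih (PySem.Set.add s x) h hmem

-- once the head sits first in the accumulator and never recurs, it just rides along in front
theorem foldl_add_cons_out (t : List String) : ∀ s : PySem.Set String, ∀ h : String,
    (∀ x ∈ t, x ≠ h) →
    t.foldl PySem.Set.add (h :: s) = h :: t.foldl PySem.Set.add s := by
  induction t with
  | nil => intro s h _; rfl
  | cons x t ih =>
    intro s h hne
    have hx : x ≠ h := hne x (List.mem_cons_self ..)
    have hstep : PySem.Set.add (h :: s) x = h :: PySem.Set.add s x := by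
      simp only [PySem.Set.add, PySem.Set.contains, List.contains_cons]
      rw [show ((x == h) = false) from by simp [hx]]
      simp only [Bool.false_or]
      split <;> simp
    simp only [List.foldl_cons, hstep]
    exact ih (PySem.Set.add s x) h (fun y hy => hne y (List.mem_cons_of_mem _ hy))

theorem nub_eq_dedup_aux : ∀ (n : Nat) (xs : List String), xs.length ≤ n →
    nubRemove xs = PySem.List.dedup xs := by
  intro n
  induction n with
  | zero =>
    intro xs hx
    have : xs = [] := List.eq_nil_of_length_eq_zero (Nat.le_zero.mp hx)
    subst this
    rw [nubRemove]; rfl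
  | succ n ih =>
    intro xs hx
    match xs with
    | [] => rw [nubRemove]; rfl
    | h :: t =>
      rw [nubRemove]
      have hlen : (t.filter (fun x => x != h)).length ≤ n := by
        have := List.length_filter_le (fun x => x != h) t
        simp only [List.length_cons] at hx
        omega
      rw [ih _ hlen]
      simp only [PySem.List.dedup, PySem.Set.ofList, List.foldl_cons]
      have h1 : PySem.Set.add PySem.Set.empty h = [h] := rfl
      have hc : PySem.Set.contains [h] h = true := by
        simp [PySem.Set.contains]
      rw [h1, foldl_add_filter t [h] h hc,
          foldl_add_cons_out (t.filter (fun x => x != h)) [] h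
            (by intro x hx'; have := List.of_mem_filter hx'; simpa using this)]
      rfl

theorem nub_eq_dedup (xs : List String) : nubRemove xs = PySem.List.dedup xs :=
  nub_eq_dedup_aux xs.length xs (Nat.le_refl _)

-- ===== VERDICT (by name: the statement is the Claim_ definition above) =====
theorem node_transfer_spec : Claim_equal_node_transfer := by
  intro xs _
  show _ = _
  have h := loop_lemma xs []
  have hmkd : mkd [] = PySem.Dict.empty := rfl
  rw [hmkd] at h
  simp only [node_transfer, show ((([] : List String).length : Int) - 1) = -1 from rfl] at h ⊢
  rw [h]
  have hupd : PySem.Set.update ([] : List String) xs = nubRemove xs := by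
    rw [PySem.Set.update_nil_left, nub_eq_dedup]; rfl
  rw [hupd]
  rfl
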